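-- pv_equiv track=rewrite | github.com/Patitotective/PREFS | PREFS/extra.py | accumulate_list
-- ===== SOURCE A (Python) =====
-- def accumulate_list(my_list: (list, tuple), separator: str="") -> list:
-- 	"""["a", "b", "c"] -> ["a", "ab", "abc"]
-- 	"""
-- 	result = []
--
-- 	for e, ele in enumerate(my_list):
-- 		if e == 0:
-- 			result.append(ele)
-- 			continue
--
-- 		result.append(f"{result[e-1]}{separator}{ele}")
--
-- 	return result
-- ===== SOURCE B (Python) =====
-- def accumulate_list(my_list, separator=""):
-- 	"""["a", "b", "c"] -> ["a", "ab", "abc"]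
-- 	"""
-- 	return [separator.join(my_list[:i + 1]) for i in range(len(my_list))]
-- ===== Notes on version B (the rewrite author's own statement) =====
-- stated objective: idiomatic
-- what changed: Replaces the stateful loop that extends result[i-1] with a single comprehension that builds each cumulative string independently as separator.join of the prefix my_list[:i+1].
import Mathlib
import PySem

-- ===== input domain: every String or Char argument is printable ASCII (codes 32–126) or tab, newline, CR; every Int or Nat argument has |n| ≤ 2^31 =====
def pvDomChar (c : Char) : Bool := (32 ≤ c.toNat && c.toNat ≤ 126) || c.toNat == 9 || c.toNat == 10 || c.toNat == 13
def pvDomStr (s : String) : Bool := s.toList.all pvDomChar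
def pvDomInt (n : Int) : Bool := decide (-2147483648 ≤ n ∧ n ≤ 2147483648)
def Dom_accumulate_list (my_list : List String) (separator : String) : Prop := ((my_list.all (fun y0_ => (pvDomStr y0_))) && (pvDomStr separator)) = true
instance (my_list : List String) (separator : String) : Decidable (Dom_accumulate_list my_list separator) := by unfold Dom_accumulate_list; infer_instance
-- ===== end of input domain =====

-- B builds each cumulative string independently as separator.join over the prefix (one comprehension), instead of A's stateful loop extending result[i-1]; objective: more idiomatic, same result.

-- ===== PORT A =====
-- for e, ele in enumerate(my_list): if e == 0: result.append(ele); else: result.append(f"{result[e-1]}{separator}{ele}")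
def accumulate_list (my_list : List String) (separator : String) : List String :=
  (PySem.List.enumerate my_list).foldl
    (fun result p =>
      if p.1 = 0 then result ++ [p.2]
      else result ++ [((PySem.List.pyGet? result (p.1 - 1)).getD "") ++ separator ++ p.2])
    []

-- ===== PORT B =====
-- [separator.join(my_list[:i+1]) for i in range(len(my_list))]
def accumulate_list_alt (my_list : List String) (separator : String) : List String :=
  (PySem.List.pyRange 0 my_list.length 1).map
    (fun i => PySem.Str.join separator (PySem.List.slice my_list none (some (i + 1))))

-- ===== PRECONDITION & SPEC =====
def Spec_accumulate_list (my_list : List String) (separator : String) (out : List String) : Prop := out = accumulate_list_alt my_list separator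
instance (my_list : List String) (separator : String) (out : List String) : Decidable (Spec_accumulate_list my_list separator out) := by unfold Spec_accumulate_list; infer_instance

-- ===== CLAIM (what is proved, stated in full; the proofs are below) =====
def Claim_equal_accumulate_list : Prop := ∀ (my_list : List String) (separator : String), Dom_accumulate_list my_list separator → Spec_accumulate_list my_list separator (accumulate_list my_list separator)

-- ===== LEMMAS AND PROOFS =====

-- reference form: the k-th cumulative value is the join of the (k+1)-prefix
def pvCum (separator : String) (l : List String) : List String :=
  (List.range l.length).map (fun k => PySem.Str.join separator (l.take (k + 1)))

theorem pvJoin_singleton (sep a : String) : PySem.Str.join sep [a] = a := by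
  show String.ofList (PySem.Chars.join sep.toList [a.toList]) = a
  rw [PySem.Chars.join_singleton, String.ofList_toList]

theorem pvJoin_cons_cons (sep a b : String) (r : List String) :
    PySem.Str.join sep (a :: b :: r) = a ++ sep ++ PySem.Str.join sep (b :: r) := by
  show String.ofList (PySem.Chars.join sep.toList (a.toList :: b.toList :: r.map String.toList))
      = a ++ sep ++ String.ofList (PySem.Chars.join sep.toList (b.toList :: r.map String.toList))
  rw [PySem.Chars.join_cons_cons, String.ofList_append, String.ofList_append,
    String.ofList_toList, String.ofList_toList]

theorem pvJoin_append_singleton (sep : String) (ys : List String) (x : String) (h : ys ≠ []) :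
    PySem.Str.join sep (ys ++ [x]) = PySem.Str.join sep ys ++ sep ++ x := by
  induction ys with
  | nil => exact absurd rfl h
  | cons a ys ih =>
    cases ys with
    | nil => rw [List.cons_append, List.nil_append, pvJoin_cons_cons, pvJoin_singleton, pvJoin_singleton]
    | cons b ys =>
      rw [List.cons_append, List.cons_append] at *
      rw [pvJoin_cons_cons, ih (by simp), pvJoin_cons_cons]
      simp [String.append_assoc]

theorem pvCum_append_singleton (sep : String) (pre : List String) (x : String) :
    pvCum sep (pre ++ [x]) = pvCum sep pre ++ [PySem.Str.join sep (pre ++ [x])] := by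
  unfold pvCum
  rw [List.length_append, List.length_singleton, List.range_succ, List.map_append]
  congr 1
  · apply List.map_congr_left
    intro k hk
    rw [List.take_append_of_le_length (by simp at hk; omega)]
  · simp [List.take_of_length_le]

theorem pvGetLast_pvCum (sep : String) (pre : List String) (h : pre ≠ []) :
    (pvCum sep pre).getLast? = some (PySem.Str.join sep pre) := by
  obtain ⟨m, hm⟩ : ∃ m, pre.length = m + 1 := by
    cases pre with
    | nil => exact absurd rfl h
    | cons a t => exact ⟨t.length, rfl⟩
  unfold pvCum
  rw [hm, List.range_succ, List.map_append, List.map_singleton, List.getLast?_concat]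
  rw [← hm, List.take_of_length_le (le_refl _)]

theorem pvA_fold (sep : String) :
    ∀ (xs pre : List String),
      (PySem.List.enumerate xs (pre.length : Int)).foldl
        (fun result p =>
          if p.1 = 0 then result ++ [p.2]
          else result ++ [((PySem.List.pyGet? result (p.1 - 1)).getD "") ++ sep ++ p.2])
        (pvCum sep pre) = pvCum sep (pre ++ xs) := by
  intro xs
  induction xs with
  | nil => intro pre; simp
  | cons x xs ih =>
    intro pre
    rw [PySem.List.enumerate_cons, List.foldl_cons]
    have hstep :
        (if (pre.length : Int) = 0 then pvCum sep pre ++ [x]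
         else pvCum sep pre ++ [((PySem.List.pyGet? (pvCum sep pre) ((pre.length : Int) - 1)).getD "") ++ sep ++ x])
        = pvCum sep (pre ++ [x]) := by
      by_cases hp : pre = []
      · subst hp
        simp [pvCum, pvJoin_singleton]
      · rw [if_neg (by simpa using hp)]
        have hget : PySem.List.pyGet? (pvCum sep pre) ((pre.length : Int) - 1)
            = some (PySem.Str.join sep pre) := by
          have h1 : ((pre.length : Int) - 1) = ((pre.length - 1 : Nat) : Int) := by
            have : 1 ≤ pre.length := Nat.one_le_iff_ne_zero.mpr (by simpa using hp)
            omega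
          rw [h1, PySem.List.pyGet?_natCast]
          have hlen : (pvCum sep pre).length = pre.length := by simp [pvCum]
          rw [← hlen, ← List.getLast?_eq_getElem?]
          exact pvGetLast_pvCum sep pre hp
        rw [hget, Option.getD_some, pvCum_append_singleton,
          pvJoin_append_singleton sep pre x hp]
    rw [hstep]
    have := ih (pre ++ [x])
    simpa [List.length_append, Int.natCast_add] using this

theorem pvAlt_eq_pvCum (l : List String) (sep : String) :
    accumulate_list_alt l sep = pvCum sep l := by
  unfold accumulate_list_alt pvCum
  rw [PySem.List.pyRange_zero_natCast, List.map_map]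
  apply List.map_congr_left
  intro k hk
  simp only [Function.comp_apply]
  have h1 : ((k : Int) + 1) = ((k + 1 : Nat) : Int) := by push_cast; ring
  rw [h1, PySem.List.slice_to_natCast]

-- ===== VERDICT (by name: the statement is the Claim_ definition above) =====
theorem accumulate_list_spec : Claim_equal_accumulate_list := by
  intro l sep _
  show accumulate_list l sep = accumulate_list_alt l sep
  rw [pvAlt_eq_pvCum]
  have := pvA_fold sep l []
  simpa [accumulate_list, pvCum] using this
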